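-- pv_equiv track=rewrite | github.com/glados-creator/NSI_lycee | terminal/NSI_Projet_5/GUI_helper.py | build_reverse_index
-- ===== SOURCE A (Python) =====
-- def build_reverse_index(dic: dict):
--     """
--     Construit un index inversé à partir d'un dictionnaire.
--
--     Args:
--     dic (dict): Le dictionnaire à partir duquel construire l'index inversé.
--
--     Returns:
--     dict: L'index inversé construit.
--
--     Raises:
--     ValueError: Si le paramètre `dic` n'est pas un dictionnaire.
--
--     Example:
--     ```
--     dictionary = {'apple': ['fruit'], 'carrot': ['vegetable'], 'banana': ['fruit', 'yellow']}
--     reverse_index = build_reverse_index(dictionary)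
--     ```
--     """
--     if not isinstance(dic, dict):
--         raise ValueError("not correct type")
--
--     reverse_index = {}
--     for key, value_list in dic.items():
--         for value in value_list:
--             # If the value is not already in the reverse index
--             if value not in reverse_index:
--                 reverse_index[value] = [key]
--             elif key not in reverse_index[value]:
--                 # check if the key is already in its list of values
--                 reverse_index[value].append(key)
--
--     # Convert the lists in the reverse index to tuples
--     for value, key_list in reverse_index.items():
--         reverse_index[value] = tuple(key_list)
--
--     return reverse_index
-- ===== SOURCE B (Python) =====
-- def build_reverse_index(dic: dict):
--     """Flatten-then-group-by: materialise the (value, key) occurrence list,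
--     then build each entry by grouping that list per distinct value."""
--     if not isinstance(dic, dict):
--         raise ValueError("not correct type")
--
--     pairs = [(v, k) for k, value_list in dic.items() for v in value_list]
--     order = dict.fromkeys(v for v, _ in pairs)
--     return {v: tuple(dict.fromkeys(k for v2, k in pairs if v2 == v))
--             for v in order}
-- ===== Notes on version B (the rewrite author's own statement) =====
-- stated objective: alternative
-- what changed: Replaces A's incremental dict-building with dedup-during-insertion (if/elif membership branches mutating reverse_index inside nested loops) by a flatten-then-group-by pipeline: first materialise the flat (value, key) occurrence list, then compute the distinct-value order and build each entry by filtering that list and deduping with dict.fromkeys.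
import Mathlib
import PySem

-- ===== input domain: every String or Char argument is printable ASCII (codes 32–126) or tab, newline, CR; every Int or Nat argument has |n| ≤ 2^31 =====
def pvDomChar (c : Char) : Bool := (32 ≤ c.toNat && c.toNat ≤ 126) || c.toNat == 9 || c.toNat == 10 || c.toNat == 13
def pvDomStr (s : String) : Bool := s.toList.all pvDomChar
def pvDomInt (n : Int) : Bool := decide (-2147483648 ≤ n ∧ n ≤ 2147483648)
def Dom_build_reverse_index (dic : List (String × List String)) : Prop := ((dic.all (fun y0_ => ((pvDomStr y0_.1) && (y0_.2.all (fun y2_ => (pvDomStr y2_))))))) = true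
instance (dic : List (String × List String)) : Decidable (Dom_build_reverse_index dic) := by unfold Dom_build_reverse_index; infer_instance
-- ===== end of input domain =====

-- B replaces A's incremental dict-building (dedup-during-insertion) by a flatten-then-group-by
-- pipeline over the materialised (value, key) occurrence list; same result, different structure.
-- A's final tuple-conversion loop is the identity under the type convention (tuple -> List).

-- ===== PORT A =====
def pvStepA (key : String) (ri : PySem.Dict String (List String)) (value : String) : PySem.Dict String (List String) :=
  if ri.contains value = false then ri.insert value [key]
  else if (ri.getD value []).contains key = false then ri.modify value [] (fun ks => ks ++ [key])
  else ri

def build_reverse_index (dic : List (String × List String)) : List (String × List String) :=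
  let ri := dic.foldl (fun ri kv => kv.2.foldl (pvStepA kv.1) ri) PySem.Dict.empty
  -- 'reverse_index[value] = tuple(key_list)' for every entry: identity under the type convention
  ri.items.map (fun p => (p.1, p.2))

-- ===== PORT B =====
def build_reverse_index_alt (dic : List (String × List String)) : List (String × List String) :=
  let pairs := dic.flatMap (fun kv => kv.2.map (fun v => (v, kv.1)))
  let order := PySem.List.dedup (pairs.map Prod.fst)              -- dict.fromkeys(v for v, _ in pairs)
  order.map (fun v => (v, PySem.List.dedup ((pairs.filter (fun p => p.1 == v)).map Prod.snd)))

-- ===== PRECONDITION & SPEC =====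
def Spec_build_reverse_index (dic : List (String × List String)) (out : List (String × List String)) : Prop := out = build_reverse_index_alt dic
instance (dic : List (String × List String)) (out : List (String × List String)) : Decidable (Spec_build_reverse_index dic out) := by unfold Spec_build_reverse_index; infer_instance

-- ===== CLAIM (what is proved, stated in full; the proofs are below) =====
def Claim_equal_build_reverse_index : Prop := ∀ (dic : List (String × List String)), Dom_build_reverse_index dic → Spec_build_reverse_index dic (build_reverse_index dic)

-- ===== LEMMAS AND PROOFS =====

-- B's group-by result on an occurrence list P: one entry per distinct value, keys deduped in order.
def pvGroup (P : List (String × String)) : List (String × List String) :=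
  (PySem.Set.ofList (P.map Prod.fst)).map
    (fun v => (v, PySem.Set.ofList ((P.filter (fun p => p.1 == v)).map Prod.snd)))

-- A's nested loops are the fold of pvStepA over the flattened occurrence list.
theorem pv_foldA_flat (dic : List (String × List String)) (ri : PySem.Dict String (List String)) :
    dic.foldl (fun ri kv => kv.2.foldl (pvStepA kv.1) ri) ri
      = (dic.flatMap (fun kv => kv.2.map (fun v => (v, kv.1)))).foldl
          (fun ri p => pvStepA p.2 ri p.1) ri := by
  induction dic generalizing ri with
  | nil => rfl
  | cons kv dic ih =>
      simp only [List.foldl_cons, List.flatMap_cons, List.foldl_append, List.foldl_map]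
      exact ih _

theorem pv_keys_group (P : List (String × String)) :
    (PySem.Dict.mk (pvGroup P)).keys = PySem.Set.ofList (P.map Prod.fst) := by
  simp [PySem.Dict.keys, pvGroup, List.map_map, Function.comp_def]

-- One step of A preserves the group-by invariant.
theorem pv_stepA_group (P : List (String × String)) (v k : String) :
    pvStepA k (PySem.Dict.mk (pvGroup P)) v = PySem.Dict.mk (pvGroup (P ++ [(v, k)])) := by
  have hnd : (PySem.Dict.mk (pvGroup P)).keys.Nodup := by
    rw [pv_keys_group]; exact PySem.Set.nodup_ofList _
  have hcont : (PySem.Dict.mk (pvGroup P)).contains v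
      = decide (v ∈ PySem.Set.ofList (P.map Prod.fst)) := by
    rw [PySem.Dict.contains_eq_decide_mem_keys, pv_keys_group]
  have hfst : (P ++ [(v, k)]).map Prod.fst = P.map Prod.fst ++ [v] := by simp
  by_cases hv : v ∈ P.map Prod.fst
  · -- value already present
    have hvS : v ∈ PySem.Set.ofList (P.map Prod.fst) := (PySem.Set.mem_ofList _ _).2 hv
    have hc : (PySem.Dict.mk (pvGroup P)).contains v = true := by
      rw [hcont]; simpa using hvS
    have hmem : (v, PySem.Set.ofList ((P.filter (fun p => p.1 == v)).map Prod.snd))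
        ∈ (PySem.Dict.mk (pvGroup P)).items := by
      show _ ∈ pvGroup P
      exact List.mem_map.2 ⟨v, hvS, rfl⟩
    have hgD : (PySem.Dict.mk (pvGroup P)).getD v []
        = PySem.Set.ofList ((P.filter (fun p => p.1 == v)).map Prod.snd) :=
      PySem.Dict.getD_of_mem_items _ hmem hnd []
    have hofst : PySem.Set.ofList ((P ++ [(v, k)]).map Prod.fst)
        = PySem.Set.ofList (P.map Prod.fst) := by
      rw [hfst, PySem.Set.ofList_append_singleton, PySem.Set.add_of_mem hvS]
    have hfilter : ∀ u : String, (P ++ [(v, k)]).filter (fun p => p.1 == u)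
        = P.filter (fun p => p.1 == u) ++ (if v = u then [(v, k)] else []) := by
      intro u; rw [List.filter_append]; by_cases huv : v = u <;> simp [huv]
    by_cases hk : k ∈ (P.filter (fun p => p.1 == v)).map Prod.snd
    · -- key already recorded: A does nothing, the group is unchanged
      have hkS : k ∈ PySem.Set.ofList ((P.filter (fun p => p.1 == v)).map Prod.snd) :=
        (PySem.Set.mem_ofList _ _).2 hk
      have hA : pvStepA k (PySem.Dict.mk (pvGroup P)) v = PySem.Dict.mk (pvGroup P) := by
        simp [pvStepA, hc, hgD, hkS]
      rw [hA]
      congr 1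
      unfold pvGroup
      rw [hofst]
      apply List.map_congr_left
      intro u _
      by_cases huv : u = v
      · subst huv
        rw [hfilter u, if_pos rfl]
        simp [PySem.Set.ofList_append_singleton, PySem.Set.add_of_mem hkS]
      · rw [hfilter u, if_neg (fun h => huv h.symm)]
        simp
    · -- key new for this value: A appends it
      have hkS : k ∉ PySem.Set.ofList ((P.filter (fun p => p.1 == v)).map Prod.snd) :=
        fun h => hk ((PySem.Set.mem_ofList _ _).1 h)
      have hA : pvStepA k (PySem.Dict.mk (pvGroup P)) v
          = (PySem.Dict.mk (pvGroup P)).insert v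
              (PySem.Set.ofList ((P.filter (fun p => p.1 == v)).map Prod.snd) ++ [k]) := by
        simp [pvStepA, hc, hgD, hkS, PySem.Dict.modify]
      rw [hA]
      apply PySem.Dict.ext
      rw [PySem.Dict.items_insert_of_contains _ _ hc]
      show (pvGroup P).map _ = pvGroup (P ++ [(v, k)])
      unfold pvGroup
      rw [hofst, List.map_map]
      apply List.map_congr_left
      intro u _
      by_cases huv : u = v
      · subst huv
        rw [hfilter u, if_pos rfl]
        simp [PySem.Set.ofList_append_singleton, PySem.Set.add_of_not_mem hkS]
      · rw [hfilter u, if_neg (fun h => huv h.symm)]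
        simp [huv]
  · -- fresh value: A appends a new singleton entry
    have hvS : v ∉ PySem.Set.ofList (P.map Prod.fst) :=
      fun h => hv ((PySem.Set.mem_ofList _ _).1 h)
    have hc : (PySem.Dict.mk (pvGroup P)).contains v = false := by
      rw [hcont]; simpa using hvS
    have hA : pvStepA k (PySem.Dict.mk (pvGroup P)) v
        = (PySem.Dict.mk (pvGroup P)).insert v [k] := by
      simp [pvStepA, hc]
    rw [hA]
    apply PySem.Dict.ext
    rw [PySem.Dict.items_insert_of_not_contains _ _ hc]
    show pvGroup P ++ [(v, [k])] = pvGroup (P ++ [(v, k)])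
    unfold pvGroup
    rw [hfst, PySem.Set.ofList_append_singleton, PySem.Set.add_of_not_mem hvS, List.map_append]
    congr 1
    · apply List.map_congr_left
      intro u hu
      have huv : v ≠ u := fun h => hv (by
        subst h; exact (PySem.Set.mem_ofList _ _).1 hu)
      rw [List.filter_append]
      simp [huv]
    · have hfilterP : P.filter (fun p => p.1 == v) = [] := by
        apply List.filter_eq_nil_iff.2
        intro p hp hpv
        exact hv (List.mem_map.2 ⟨p, hp, by simpa using hpv⟩)
      simp [List.filter_append, hfilterP, PySem.Set.ofList]

-- The whole fold of A over an occurrence list produces the group-by dict.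
theorem pv_foldA_group (P : List (String × String)) :
    P.foldl (fun ri p => pvStepA p.2 ri p.1) PySem.Dict.empty = PySem.Dict.mk (pvGroup P) := by
  induction P using List.reverseRecOn with
  | nil => rfl
  | append_singleton P p ih =>
      rw [List.foldl_append, List.foldl_cons, List.foldl_nil, ih, pv_stepA_group]

-- ===== VERDICT (by name: the statement is the Claim_ definition above) =====
theorem build_reverse_index_spec : Claim_equal_build_reverse_index := by
  intro dic _
  unfold Spec_build_reverse_index build_reverse_index build_reverse_index_alt
  rw [pv_foldA_flat, pv_foldA_group]
  simp [pvGroup, List.map_map, Function.comp_def]
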